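-- pv_equiv track=rewrite | github.com/Stepleo/Tetris_AI | Tetris.py | creation_grille
-- ===== SOURCE A (Python) =====
-- def creation_grille(positions_statiques):
--     grille = [[(0, 0, 0) for k in range(10)] for k in range(20)]
--
--     for i in range(len(grille)):
--         for j in range(len(grille[i])):
--             if (j, i) in positions_statiques:
--                 c = positions_statiques[(j, i)]
--                 grille[i][j] = c
--     return grille
-- ===== SOURCE B (Python) =====
-- def creation_grille(positions_statiques):
--     grille = [[(0, 0, 0)] * 10 for _ in range(20)]
--     for (j, i), c in positions_statiques.items():
--         if 0 <= i < 20 and 0 <= j < 10: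
--             grille[i][j] = c
--     return grille
-- ===== Notes on version B (the rewrite author's own statement) =====
-- stated objective: simpler
-- what changed: Instead of scanning all 200 grid cells and testing each cell's coordinates for dict membership, B makes a single pass over positions_statiques.items(), writing each in-range entry directly into a prebuilt zero grid.
import Mathlib
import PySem

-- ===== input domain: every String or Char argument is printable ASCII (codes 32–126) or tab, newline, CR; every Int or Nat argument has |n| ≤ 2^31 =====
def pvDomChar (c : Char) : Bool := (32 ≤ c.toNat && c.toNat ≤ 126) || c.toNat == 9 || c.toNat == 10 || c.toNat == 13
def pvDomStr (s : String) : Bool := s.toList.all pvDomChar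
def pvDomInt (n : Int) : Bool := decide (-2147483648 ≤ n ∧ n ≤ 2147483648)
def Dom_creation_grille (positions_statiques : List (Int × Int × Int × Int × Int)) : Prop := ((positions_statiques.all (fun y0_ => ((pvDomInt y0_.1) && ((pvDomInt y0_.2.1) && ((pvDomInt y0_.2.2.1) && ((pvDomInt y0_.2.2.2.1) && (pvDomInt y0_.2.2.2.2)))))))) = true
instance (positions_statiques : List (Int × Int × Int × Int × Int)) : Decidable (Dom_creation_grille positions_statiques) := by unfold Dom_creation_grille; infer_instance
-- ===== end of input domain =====

-- B replaces A's 200-cell scan (membership test per cell) by one pass over the dict's items,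
-- writing each in-range entry into a prebuilt zero grid: simpler, same results.

-- shared argument marshalling: the Python parameter is a dict {(j, i): c}; under the type
-- convention it arrives as an association list of 5-tuples, which we load into a PySem.Dict
-- exactly as CPython builds the dict (later duplicate keys overwrite, first position kept).
def pvDictOf (positions_statiques : List (Int × Int × Int × Int × Int)) :
    PySem.Dict (Int × Int) (Int × Int × Int) :=
  PySem.Dict.ofList (positions_statiques.map (fun t => ((t.1, t.2.1), t.2.2.1, t.2.2.2.1, t.2.2.2.2)))

-- ===== PORT A =====
def creation_grille (positions_statiques : List (Int × Int × Int × Int × Int)) : List (List (Int × Int × Int)) :=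
  let d := pvDictOf positions_statiques
  let grille : List (List (Int × Int × Int)) :=
    (List.range 20).map (fun _ => (List.range 10).map (fun _ => ((0 : Int), (0 : Int), (0 : Int))))
  (List.range grille.length).foldl (fun g (i : Nat) =>
    (List.range ((g.getD i []).length)).foldl (fun g2 (j : Nat) =>
      match d.get? ((j : Int), (i : Int)) with        -- 'if (j, i) in …: c = …[(j, i)]'
      | some c => g2.modify i (fun row => row.set j c)  -- grille[i][j] = c
      | none => g2) g) grille

-- ===== PORT B =====
def creation_grille_alt (positions_statiques : List (Int × Int × Int × Int × Int)) : List (List (Int × Int × Int)) :=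
  let d := pvDictOf positions_statiques
  let grille : List (List (Int × Int × Int)) :=
    List.replicate 20 (List.replicate 10 ((0 : Int), (0 : Int), (0 : Int)))
  d.items.foldl (fun g kv =>
    if 0 ≤ kv.1.2 ∧ kv.1.2 < 20 ∧ 0 ≤ kv.1.1 ∧ kv.1.1 < 10 then
      g.modify kv.1.2.toNat (fun row => row.set kv.1.1.toNat kv.2)  -- grille[i][j] = c
    else g) grille

-- ===== PRECONDITION & SPEC =====
def Spec_creation_grille (positions_statiques : List (Int × Int × Int × Int × Int)) (out : List (List (Int × Int × Int))) : Prop := out = creation_grille_alt positions_statiques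
instance (positions_statiques : List (Int × Int × Int × Int × Int)) (out : List (List (Int × Int × Int))) : Decidable (Spec_creation_grille positions_statiques out) := by unfold Spec_creation_grille; infer_instance

-- ===== CLAIM (what is proved, stated in full; the proofs are below) =====
def Claim_equal_creation_grille : Prop := ∀ (positions_statiques : List (Int × Int × Int × Int × Int)), Dom_creation_grille positions_statiques → Spec_creation_grille positions_statiques (creation_grille positions_statiques)

-- ===== LEMMAS AND PROOFS =====
def pvCell (g : List (List (Int × Int × Int))) (i j : Nat) : Option (Int × Int × Int) :=
  g[i]? >>= fun row => row[j]?
def pvShape (g : List (List (Int × Int × Int))) : Prop :=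
  g.length = 20 ∧ ∀ r ∈ g, r.length = 10

theorem pvShape_modify_set (g : List (List (Int × Int × Int))) (i j : Nat) (c : Int × Int × Int)
    (h : pvShape g) : pvShape (g.modify i (fun row => row.set j c)) := by
  obtain ⟨hlen, hrow⟩ := h
  refine ⟨by simp [hlen], ?_⟩
  intro r hr
  rw [List.mem_iff_getElem?] at hr
  obtain ⟨k, hk⟩ := hr
  rw [List.getElem?_modify] at hk
  rcases hg : g[k]? with _ | row
  · simp [hg] at hk
  · have hrl : row.length = 10 := hrow row (List.mem_of_getElem? hg)
    simp [hg] at hk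
    split at hk <;> simp [← hk, hrl]

theorem pvCell_modify_set (g : List (List (Int × Int × Int))) (i j : Nat) (c : Int × Int × Int)
    (h : pvShape g) (hi : i < 20) (hj : j < 10) (i' j' : Nat) :
    pvCell (g.modify i (fun row => row.set j c)) i' j' =
      if i' = i ∧ j' = j then some c else pvCell g i' j' := by
  obtain ⟨hlen, hrow⟩ := h
  have hi' : i < g.length := by omega
  have hg : g[i]? = some g[i] := List.getElem?_eq_getElem hi'
  have hrl : (g[i]).length = 10 := hrow _ (List.getElem_mem hi')
  by_cases hii : i' = i
  · subst hii
    simp [pvCell, hg, List.getElem?_set, hrl]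
    by_cases hjj : j' = j
    · subst hjj; simp [hj]
    · simp [hjj, Ne.symm hjj]
  · simp [pvCell, hii, Ne.symm hii]



theorem pvA_inner_shape (d : PySem.Dict (Int × Int) (Int × Int × Int)) (i : Nat)
    (n : Nat) (g : List (List (Int × Int × Int))) (hs : pvShape g) :
    pvShape ((List.range n).foldl (fun g2 (j : Nat) =>
      match d.get? ((j : Int), (i : Int)) with
      | some c => g2.modify i (fun row => row.set j c)
      | none => g2) g) := by
  induction n with
  | zero => exact hs
  | succ n ih =>
    rw [List.range_succ, List.foldl_append, List.foldl_cons, List.foldl_nil]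
    rcases d.get? ((n : Int), (i : Int)) with _ | c
    · exact ih
    · exact pvShape_modify_set _ _ _ _ ih

theorem pvA_inner (d : PySem.Dict (Int × Int) (Int × Int × Int)) (i : Nat) (hi : i < 20)
    (n : Nat) (hn : n ≤ 10) (g : List (List (Int × Int × Int))) (hs : pvShape g)
    (i' j' : Nat) :
    pvCell ((List.range n).foldl (fun g2 (j : Nat) =>
      match d.get? ((j : Int), (i : Int)) with
      | some c => g2.modify i (fun row => row.set j c)
      | none => g2) g) i' j' =
      if i' = i ∧ j' < n ∧ (d.get? ((j' : Int), (i : Int))).isSome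
      then d.get? ((j' : Int), (i : Int)) else pvCell g i' j' := by
  induction n with
  | zero => simp
  | succ n ih =>
    rw [List.range_succ, List.foldl_append, List.foldl_cons, List.foldl_nil]
    rcases hd : d.get? ((n : Int), (i : Int)) with _ | c
    · rw [ih (by omega)]
      by_cases hj' : j' = n
      · subst hj'; simp [hd]
      · have he : j' < n + 1 ↔ j' < n := by omega
        simp only [he]
    · rw [pvCell_modify_set _ _ _ _ (pvA_inner_shape d i n g hs) hi (by omega),
        ih (by omega)]
      by_cases hii : i' = i
      · subst hii
        by_cases hj' : j' = n
        · subst hj'; simp [hd]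
        · simp only [hj', and_false, if_false, true_and]
          have he : j' < n + 1 ↔ j' < n := by omega
          simp only [he]
      · simp [hii]

theorem pvA_outer_shape (d : PySem.Dict (Int × Int) (Int × Int × Int)) (n : Nat)
    (g : List (List (Int × Int × Int))) (hs : pvShape g) :
    pvShape ((List.range n).foldl (fun g (i : Nat) =>
      (List.range ((g.getD i []).length)).foldl (fun g2 (j : Nat) =>
        match d.get? ((j : Int), (i : Int)) with
        | some c => g2.modify i (fun row => row.set j c)
        | none => g2) g) g) := by
  induction n with
  | zero => exact hs
  | succ n ih =>
    rw [List.range_succ, List.foldl_append, List.foldl_cons, List.foldl_nil]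
    exact pvA_inner_shape d n _ _ ih

theorem pvA_outer (d : PySem.Dict (Int × Int) (Int × Int × Int)) (n : Nat) (hn : n ≤ 20)
    (g : List (List (Int × Int × Int))) (hs : pvShape g) (i' j' : Nat) :
    pvCell ((List.range n).foldl (fun g (i : Nat) =>
      (List.range ((g.getD i []).length)).foldl (fun g2 (j : Nat) =>
        match d.get? ((j : Int), (i : Int)) with
        | some c => g2.modify i (fun row => row.set j c)
        | none => g2) g) g) i' j' =
      if i' < n ∧ j' < 10 ∧ (d.get? ((j' : Int), (i' : Int))).isSome
      then d.get? ((j' : Int), (i' : Int)) else pvCell g i' j' := by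
  induction n with
  | zero => simp
  | succ n ih =>
    rw [List.range_succ, List.foldl_append, List.foldl_cons, List.foldl_nil]
    have hsn := pvA_outer_shape d n g hs
    have hrowlen : ((((List.range n).foldl (fun g (i : Nat) =>
        (List.range ((g.getD i []).length)).foldl (fun g2 (j : Nat) =>
          match d.get? ((j : Int), (i : Int)) with
          | some c => g2.modify i (fun row => row.set j c)
          | none => g2) g) g).getD n []).length) = 10 := by
      obtain ⟨hlen, hrow⟩ := hsn
      rw [List.getD_eq_getElem?_getD, List.getElem?_eq_getElem (by omega)]
      exact hrow _ (List.getElem_mem _)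
    rw [hrowlen, pvA_inner d n (by omega) 10 (by omega) _ hsn, ih (by omega)]
    by_cases hii : i' = n
    · subst hii
      simp only [lt_irrefl, false_and, if_false, Nat.lt_succ_self, true_and]
    · simp only [hii, false_and, if_false]
      have he : i' < n + 1 ↔ i' < n := by omega
      simp only [he]


theorem pvB_shape (items : List ((Int × Int) × (Int × Int × Int)))
    (g : List (List (Int × Int × Int))) (hs : pvShape g) :
    pvShape (items.foldl (fun g kv =>
      if 0 ≤ kv.1.2 ∧ kv.1.2 < 20 ∧ 0 ≤ kv.1.1 ∧ kv.1.1 < 10 then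
        g.modify kv.1.2.toNat (fun row => row.set kv.1.1.toNat kv.2)
      else g) g) := by
  induction items generalizing g with
  | nil => exact hs
  | cons kv rest ih =>
    simp only [List.foldl_cons]
    split
    · exact ih _ (pvShape_modify_set _ _ _ _ hs)
    · exact ih _ hs

theorem pvB_cells (items : List ((Int × Int) × (Int × Int × Int)))
    (hnd : (items.map (·.1)).Nodup) (g : List (List (Int × Int × Int))) (hs : pvShape g)
    (i j : Nat) (hi : i < 20) (hj : j < 10) :
    pvCell (items.foldl (fun g kv =>
      if 0 ≤ kv.1.2 ∧ kv.1.2 < 20 ∧ 0 ≤ kv.1.1 ∧ kv.1.1 < 10 then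
        g.modify kv.1.2.toNat (fun row => row.set kv.1.1.toNat kv.2)
      else g) g) i j =
      ((items.find? (fun p => p.1 == ((j : Int), (i : Int)))).map (·.2)).or (pvCell g i j) := by
  induction items generalizing g with
  | nil => simp
  | cons kv rest ih =>
    obtain ⟨⟨jq, iq⟩, c⟩ := kv
    simp only [List.map_cons, List.nodup_cons] at hnd
    obtain ⟨hnotin, hndr⟩ := hnd
    simp only [List.foldl_cons]
    by_cases hkey : (jq, iq) = ((j : Int), (i : Int))
    · obtain ⟨hjq, hiq⟩ := Prod.mk.injEq .. ▸ hkey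
      have hcond : (0:Int) ≤ iq ∧ iq < 20 ∧ (0:Int) ≤ jq ∧ jq < 10 := by
        subst hjq hiq; refine ⟨by positivity, by exact_mod_cast hi, by positivity, by exact_mod_cast hj⟩
      rw [if_pos hcond]
      have hiqn : iq.toNat = i := by omega
      have hjqn : jq.toNat = j := by omega
      rw [hiqn, hjqn]
      have hfr : rest.find? (fun p => p.1 == ((j : Int), (i : Int))) = none := by
        rw [List.find?_eq_none]
        intro x hx hbx
        exact hnotin (hkey ▸ (by simpa using hbx) ▸ List.mem_map_of_mem hx)
      rw [ih hndr _ (pvShape_modify_set _ _ _ _ hs), hfr,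
        pvCell_modify_set _ _ _ _ hs hi hj]
      simp [hkey]
    · have hfind : List.find? (fun p => p.1 == ((j : Int), (i : Int))) (((jq, iq), c) :: rest)
          = rest.find? (fun p => p.1 == ((j : Int), (i : Int))) := by
        rw [List.find?_cons_of_neg]; simpa using hkey
      rw [hfind]
      split
      · rename_i hcond
        rw [ih hndr _ (pvShape_modify_set _ _ _ _ hs),
          pvCell_modify_set _ _ _ _ hs (by omega) (by omega)]
        have : ¬ (i = iq.toNat ∧ j = jq.toNat) := by
          rintro ⟨h1, h2⟩
          exact hkey (by simp only [Prod.mk.injEq]; omega)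
        rw [if_neg this]
      · exact ih hndr _ hs


theorem pv_grids_eq (g1 g2 : List (List (Int × Int × Int))) (h1 : pvShape g1) (h2 : pvShape g2)
    (h : ∀ i j, i < 20 → j < 10 → pvCell g1 i j = pvCell g2 i j) : g1 = g2 := by
  obtain ⟨hl1, hr1⟩ := h1
  obtain ⟨hl2, hr2⟩ := h2
  refine List.ext_getElem? fun k => ?_
  by_cases hk : k < 20
  · rw [List.getElem?_eq_getElem (by omega), List.getElem?_eq_getElem (by omega)]
    congr 1
    have hrl1 : (g1[k]'(by omega)).length = 10 := hr1 _ (List.getElem_mem _)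
    have hrl2 : (g2[k]'(by omega)).length = 10 := hr2 _ (List.getElem_mem _)
    refine List.ext_getElem? fun j => ?_
    by_cases hj : j < 10
    · have := h k j hk hj
      simpa [pvCell, List.getElem?_eq_getElem (show k < g1.length by omega),
        List.getElem?_eq_getElem (show k < g2.length by omega)] using this
    · rw [List.getElem?_eq_none (by omega), List.getElem?_eq_none (by omega)]
  · rw [List.getElem?_eq_none (by omega), List.getElem?_eq_none (by omega)]

-- ===== VERDICT (by name: the statement is the Claim_ definition above) =====
theorem creation_grille_spec : Claim_equal_creation_grille := by
  intro ps _hdom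
  unfold Spec_creation_grille creation_grille creation_grille_alt
  set d := pvDictOf ps with hd
  have hinit : (List.map (fun _ => List.map (fun _ => ((0:Int), (0:Int), (0:Int))) (List.range 10))
      (List.range 20)) = List.replicate 20 (List.replicate 10 ((0:Int), (0:Int), (0:Int))) := by
    simp [List.map_const']
  rw [hinit]
  simp only [List.length_replicate]
  have hs0 : pvShape (List.replicate 20 (List.replicate 10 ((0:Int), (0:Int), (0:Int)))) := by
    refine ⟨by simp, fun r hr => ?_⟩
    rw [List.eq_of_mem_replicate hr]
    simp
  have hnd : (d.items.map (·.1)).Nodup := by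
    simpa [PySem.Dict.keys] using PySem.Dict.nodup_keys_ofList
      (ps.map (fun t => ((t.1, t.2.1), t.2.2.1, t.2.2.2.1, t.2.2.2.2)))
  refine pv_grids_eq _ _ (pvA_outer_shape d 20 _ hs0) (pvB_shape _ _ hs0) ?_
  intro i j hi hj
  rw [pvA_outer d 20 le_rfl _ hs0 i j, pvB_cells d.items hnd _ hs0 i j hi hj]
  simp only [hi, hj, true_and]
  rcases hget : d.get? ((j : Int), (i : Int)) with _ | c
  · simp only [PySem.Dict.get?] at hget
    simp [hget]
  · simp only [PySem.Dict.get?] at hget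
    simp [hget]
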